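-- pv_equiv track=rewrite | github.com/JamiesonChase/Plagarism-Detection-tool | secondComparisonAlgorithm/modules/comparison/comparison3.py | getLineScore
-- ===== SOURCE A (Python) =====
-- MIN_HASH_THRESHOLD = 0.6 # TODO: test this number more
--
-- def compareLine(hashes1, hashes2):
--     """
--     Computes the ratio of the number of shared hashes in hashes1 and hashes2
--     to the total number of hashes in the larger of the two lists.
--
--     Compexity: O(min(len(s), len(t))) on average, O(len(s) * len(t)) worst case
--         - s is hashes1
--         - t is hashes2
--     """
--     matches = set.intersection(set(hashes1), set(hashes2))
--     return len(matches) / max(len(hashes1), len(hashes2))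
--
-- def findLongestSequence(s1, s2, index1, index2):
--     """
--     Returns the length of the longest sequence of similar lines in index1 and index2
--     starting on lines s1 and s2 respectively.
--
--     TODO: time complexity
--     """
--
--     # base cases for recursion
--     if s1 > len(index1) or s2 > len(index2):
--         # don't go past index bounds
--         return 0
--     if compareLine(index1[s1], index2[s2]) < MIN_HASH_THRESHOLD:
--         # once the two lines aren't similar enough, return
--         return 0
--
--     # add 1
--     return 1 + findLongestSequence(s1 + 1, s2 + 1, index1, index2)
--
-- def getLineScore(line1, index1, index2):
--     """
--     Compares line1 from index1 to every line in index2, finding the longest sequence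
--     at each one. Returns the maximum of longest sequences found, along with the line
--     number(s) that longest sequence was found at.
--
--     TODO: time complexity
--     """
--     score = 0
--     maxScore = 0
--     bestLines = []
--
--     # iterate over the lines in index2
--     line2 = 1
--     while line2 < len(index2):
--         # calculate the score for line1 on line2
--         score = findLongestSequence(line1, line2, index1, index2)
--         if score > maxScore:
--             maxScore = score
--             bestLines = [line2]
--         # when score is the same as max, add line2 to list of best lines
--         elif score == maxScore and score > 0:
--             bestLines.append(line2)
--         # increment line2
--         line2 += max(score, 1)
--
--     return [maxScore, bestLines]
-- ===== SOURCE B (Python) =====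
-- MIN_HASH_THRESHOLD = 0.6  # similarity threshold; tested below in exact integer arithmetic (5*m >= 3*M <=> m/M >= 0.6)
--
-- def getLineScore(line1, index1, index2):
--     n1, n2 = len(index1), len(index2)
--     # precompute the distinct-element set of every line once
--     sets1 = [set(line) for line in index1]
--     sets2 = [set(line) for line in index2]
--
--     def run_length(line2):
--         # iterative run counter instead of recursion
--         count, s1, s2 = 0, line1, line2
--         while (s1 <= n1 and s2 <= n2
--                and 5 * len(sets1[s1] & sets2[s2]) >= 3 * max(len(index1[s1]), len(index2[s2]))):
--             count += 1
--             s1 += 1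
--             s2 += 1
--         return count
--
--     maxScore, bestLines = 0, []
--     line2 = 1
--     while line2 < n2:
--         score = run_length(line2)
--         if score > maxScore:
--             maxScore, bestLines = score, [line2]
--         elif score == maxScore and score > 0:
--             bestLines.append(line2)
--         line2 += score if score > 1 else 1
--     return [maxScore, bestLines]
-- ===== Notes on version B (the rewrite author's own statement) =====
-- stated objective: alternative
-- what changed: The recursive findLongestSequence (which rebuilds both hash sets on every call and divides floats) is replaced by an iterative run-length counter over per-line distinct-element sets precomputed once, with the 0.6 ratio test done in exact cross-multiplied integer arithmetic.
import Mathlib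
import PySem

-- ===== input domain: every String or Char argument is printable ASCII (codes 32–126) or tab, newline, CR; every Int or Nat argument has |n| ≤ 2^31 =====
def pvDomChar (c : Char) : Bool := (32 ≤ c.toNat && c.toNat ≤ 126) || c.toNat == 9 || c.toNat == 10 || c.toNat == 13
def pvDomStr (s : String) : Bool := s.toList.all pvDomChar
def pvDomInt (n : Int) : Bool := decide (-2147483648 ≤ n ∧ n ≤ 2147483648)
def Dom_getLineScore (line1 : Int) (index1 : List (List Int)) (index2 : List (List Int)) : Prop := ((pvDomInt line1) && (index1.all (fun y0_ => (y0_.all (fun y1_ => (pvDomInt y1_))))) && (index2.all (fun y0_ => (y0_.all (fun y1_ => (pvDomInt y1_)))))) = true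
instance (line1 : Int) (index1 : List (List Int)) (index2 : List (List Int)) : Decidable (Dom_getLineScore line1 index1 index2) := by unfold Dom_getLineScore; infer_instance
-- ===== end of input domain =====

-- B replaces the recursive findLongestSequence (a fresh set build per comparison, a float ratio)
-- by per-line distinct-element sets precomputed once plus an iterative run-length counter; the
-- `ratio >= 0.6` test is ported on both sides as the exact integer comparison 5*|matches| >= 3*max(len,len).
-- Both recursions are totalized with a fuel counter that is never exhausted on the loops' actual
-- iteration counts (s2/line2 strictly increase towards len(index2), so len(index2)+2 steps suffice).

-- ===== PORT A =====
-- compareLine(h1, h2) compared against MIN_HASH_THRESHOLD = 0.6: `len(matches)/max(..) >= 0.6`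
-- is ported as 5*len(matches) >= 3*max(..) — exact for all list lengths reachable here (the float
-- comparison could only disagree for lengths near 2^53). When both lists are empty Python raises
-- ZeroDivisionError; those inputs are excluded by Pre_ and the port's value there is immaterial.
def compareLineGE (hashes1 hashes2 : List Int) : Bool :=
  let shared := PySem.Set.inter (PySem.Set.ofList hashes1) (PySem.Set.ofList hashes2)
  decide (3 * max hashes1.length hashes2.length ≤ 5 * shared.length)

-- recursion of findLongestSequence; pyGet? none (IndexError in Python) returns 0, outside Pre_
def findLongestSequence (fuel : Nat) (s1 s2 : Int) (index1 index2 : List (List Int)) : Int :=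
  match fuel with
  | 0 => 0
  | fuel + 1 =>
    if (index1.length : Int) < s1 ∨ (index2.length : Int) < s2 then 0
    else
      match PySem.List.pyGet? index1 s1, PySem.List.pyGet? index2 s2 with
      | some l1, some l2 =>
          if compareLineGE l1 l2 then 1 + findLongestSequence fuel (s1 + 1) (s2 + 1) index1 index2
          else 0
      | _, _ => 0

def getLineScoreLoop (fuel : Nat) (line1 : Int) (index1 index2 : List (List Int))
    (line2 maxScore : Int) (bestLines : List Int) : Int × List Int :=
  match fuel with
  | 0 => (maxScore, bestLines)
  | fuel + 1 =>
    if line2 < (index2.length : Int) then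
      let score := findLongestSequence (index2.length + 2) line1 line2 index1 index2
      if score > maxScore then
        getLineScoreLoop fuel line1 index1 index2 (line2 + max score 1) score [line2]
      else if score = maxScore ∧ score > 0 then
        getLineScoreLoop fuel line1 index1 index2 (line2 + max score 1) maxScore (bestLines ++ [line2])
      else
        getLineScoreLoop fuel line1 index1 index2 (line2 + max score 1) maxScore bestLines
    else (maxScore, bestLines)

def getLineScore (line1 : Int) (index1 : List (List Int)) (index2 : List (List Int)) : Int × List Int :=
  getLineScoreLoop (index2.length + 1) line1 index1 index2 1 0 []

-- ===== PORT B =====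
-- the iterative `while … : count += 1; s1 += 1; s2 += 1` of run_length in Source B
def runLength (fuel : Nat) (n1 n2 : Int) (sets1 sets2 : List (PySem.Set Int)) (index1 index2 : List (List Int))
    (count s1 s2 : Int) : Int :=
  match fuel with
  | 0 => count
  | fuel + 1 =>
    if s1 ≤ n1 ∧ s2 ≤ n2 then
      match PySem.List.pyGet? sets1 s1, PySem.List.pyGet? sets2 s2,
            PySem.List.pyGet? index1 s1, PySem.List.pyGet? index2 s2 with
      | some a, some b, some l1, some l2 =>
          if 3 * max l1.length l2.length ≤ 5 * (PySem.Set.inter a b).length then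
            runLength fuel n1 n2 sets1 sets2 index1 index2 (count + 1) (s1 + 1) (s2 + 1)
          else count
      | _, _, _, _ => count
    else count

def getLineScoreAltLoop (fuel : Nat) (line1 n1 n2 : Int) (sets1 sets2 : List (PySem.Set Int))
    (index1 index2 : List (List Int)) (line2 maxScore : Int) (bestLines : List Int) : Int × List Int :=
  match fuel with
  | 0 => (maxScore, bestLines)
  | fuel + 1 =>
    if line2 < n2 then
      let score := runLength (n2.toNat + 2) n1 n2 sets1 sets2 index1 index2 0 line1 line2
      if score > maxScore then
        getLineScoreAltLoop fuel line1 n1 n2 sets1 sets2 index1 index2 (line2 + (if score > 1 then score else 1)) score [line2]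
      else if score = maxScore ∧ score > 0 then
        getLineScoreAltLoop fuel line1 n1 n2 sets1 sets2 index1 index2 (line2 + (if score > 1 then score else 1)) maxScore (bestLines ++ [line2])
      else
        getLineScoreAltLoop fuel line1 n1 n2 sets1 sets2 index1 index2 (line2 + (if score > 1 then score else 1)) maxScore bestLines
    else (maxScore, bestLines)

def getLineScore_alt (line1 : Int) (index1 : List (List Int)) (index2 : List (List Int)) : Int × List Int :=
  let n1 : Int := index1.length
  let n2 : Int := index2.length
  let sets1 := index1.map PySem.Set.ofList
  let sets2 := index2.map PySem.Set.ofList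
  getLineScoreAltLoop (index2.length + 1) line1 n1 n2 sets1 sets2 index1 index2 1 0 []

-- ===== PRECONDITION & SPEC =====
-- pvSimStep line1 t index1 index2 k: the k-th diagonal pair starting from (line1, t) passes A's
-- bounds check, is indexable (Python indexing, negative wrap included), is not both empty
-- (no ZeroDivisionError) and is similar — i.e. A's recursion steps past it.
def pvSimStep (line1 t : Int) (index1 index2 : List (List Int)) (k : Nat) : Bool :=
  decide (line1 + k ≤ (index1.length : Int)) && decide (t + k ≤ (index2.length : Int)) &&
  (match PySem.List.pyGet? index1 (line1 + k), PySem.List.pyGet? index2 (t + k) with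
   | some l1, some l2 =>
       (!(l1.isEmpty && l2.isEmpty)) &&
       decide (3 * max l1.length l2.length ≤ 5 * (PySem.Set.inter (PySem.Set.ofList l1) (PySem.Set.ofList l2)).length)
   | _, _ => false)

-- number of similar steps on the diagonal starting at (line1, t): length of the maximal
-- prefix of offsets on which pvSimStep holds (for t ≥ 1 it always stops within range (n2+1))
def pvScore (line1 t : Int) (index1 index2 : List (List Int)) : Nat :=
  ((List.range (index2.length + 1)).takeWhile (pvSimStep line1 t index1 index2)).length

-- the diagonal starting at (line1, t) terminates WITHOUT an exception: at the first non-similar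
-- offset either a bound is strictly exceeded (A returns) or both lines are indexable, not both
-- empty, and dissimilar (A returns); otherwise Python raises IndexError / ZeroDivisionError there.
def pvClean (line1 t : Int) (index1 index2 : List (List Int)) : Bool :=
  let k := pvScore line1 t index1 index2
  decide ((index1.length : Int) < line1 + k) || decide ((index2.length : Int) < t + k) ||
  (match PySem.List.pyGet? index1 (line1 + k), PySem.List.pyGet? index2 (t + k) with
   | some l1, some l2 =>
       (!(l1.isEmpty && l2.isEmpty)) &&
       decide (5 * (PySem.Set.inter (PySem.Set.ofList l1) (PySem.Set.ofList l2)).length < 3 * max l1.length l2.length)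
   | _, _ => false)

-- the start lines A's outer loop visits: line2 = 1, then line2 + max(score, 1)
def pvChain (line1 : Int) (index1 index2 : List (List Int)) (k : Nat) : Int :=
  Nat.rec 1 (fun _ t => t + max (pvScore line1 t index1 index2) 1) k

-- Pre_ excludes EXACTLY the inputs on which Python A raises (IndexError when a run of similar
-- lines reaches the end of either index — A checks `s1 > len(index1)` instead of `>=` — and
-- ZeroDivisionError when two compared lines are both empty): every start line the outer scan
-- actually visits (1, then advancing by max(score,1); the chain advances by ≥ 1, so n2 steps
-- cover the whole scan) must have a cleanly terminating diagonal. Lines the scan skips over are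
-- NOT constrained: on those inputs A returns and the claim covers them.
def Pre_getLineScore (line1 : Int) (index1 : List (List Int)) (index2 : List (List Int)) : Prop :=
  ∀ k < index2.length,
    pvChain line1 index1 index2 k < (index2.length : Int) →
    pvClean line1 (pvChain line1 index1 index2 k) index1 index2 = true

instance (line1 : Int) (index1 : List (List Int)) (index2 : List (List Int)) : Decidable (Pre_getLineScore line1 index1 index2) := by unfold Pre_getLineScore; infer_instance

def pvWitness_getLineScore : Int × List (List Int) × List (List Int) := (0, [[1], [2]], [[1], [3]])

def Spec_getLineScore (line1 : Int) (index1 : List (List Int)) (index2 : List (List Int)) (out : Int × List Int) : Prop := out = getLineScore_alt line1 index1 index2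
instance (line1 : Int) (index1 : List (List Int)) (index2 : List (List Int)) (out : Int × List Int) : Decidable (Spec_getLineScore line1 index1 index2 out) := by unfold Spec_getLineScore; infer_instance

-- ===== CLAIM (what is proved, stated in full; the proofs are below) =====
def Claim_equal_getLineScore : Prop := ∀ (line1 : Int) (index1 : List (List Int)) (index2 : List (List Int)), Dom_getLineScore line1 index1 index2 → Pre_getLineScore line1 index1 index2 → Spec_getLineScore line1 index1 index2 (getLineScore line1 index1 index2)

-- ===== LEMMAS AND PROOFS =====

lemma pyGet?_map {α β : Type} (f : α → β) (xs : List α) (i : Int) :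
    PySem.List.pyGet? (xs.map f) i = (PySem.List.pyGet? xs i).map f := by
  simp [PySem.List.pyGet?, PySem.List.pyIdx?]

lemma runLength_eq_find (fuel : Nat) (index1 index2 : List (List Int)) (s1 s2 count : Int) :
    runLength fuel index1.length index2.length (index1.map PySem.Set.ofList) (index2.map PySem.Set.ofList)
      index1 index2 count s1 s2 = count + findLongestSequence fuel s1 s2 index1 index2 := by
  induction fuel generalizing s1 s2 count with
  | zero => simp [runLength, findLongestSequence]
  | succ fuel ih =>
    rw [runLength, findLongestSequence]
    by_cases hb : s1 ≤ (index1.length : Int) ∧ s2 ≤ (index2.length : Int)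
    · rw [if_pos hb, if_neg (by omega)]
      rcases hg1 : PySem.List.pyGet? index1 s1 with _ | l1 <;>
        rcases hg2 : PySem.List.pyGet? index2 s2 with _ | l2 <;>
        simp only [pyGet?_map, hg1, hg2, Option.map_some, Option.map_none]
      · omega
      · omega
      · omega
      · simp only [compareLineGE, decide_eq_true_eq]
        split
        · rw [ih]; omega
        · omega
    · rw [if_neg hb, if_pos (by omega)]
      omega

lemma altLoop_eq_loop (fuel : Nat) (line1 : Int) (index1 index2 : List (List Int))
    (line2 maxScore : Int) (best : List Int) :
    getLineScoreAltLoop fuel line1 index1.length index2.length (index1.map PySem.Set.ofList)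
      (index2.map PySem.Set.ofList) index1 index2 line2 maxScore best
    = getLineScoreLoop fuel line1 index1 index2 line2 maxScore best := by
  induction fuel generalizing line2 maxScore best with
  | zero => rfl
  | succ fuel ih =>
    rw [getLineScoreAltLoop, getLineScoreLoop]
    by_cases h : line2 < (index2.length : Int)
    · rw [if_pos h, if_pos h]
      have hfuel : ((index2.length : Int)).toNat + 2 = index2.length + 2 := by omega
      simp only [hfuel, runLength_eq_find, zero_add]
      have hstep : ∀ s : Int, (if s > 1 then s else 1) = max s 1 := fun s => by
        split <;> omega
      split
      · rw [hstep]; exact ih _ _ _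
      · split
        · rw [hstep]; exact ih _ _ _
        · rw [hstep]; exact ih _ _ _
    · rw [if_neg h, if_neg h]

-- ===== VERDICT (by name: the statement is the Claim_ definition above) =====
theorem getLineScore_spec : Claim_equal_getLineScore := by
  intro line1 index1 index2 _ _
  unfold Spec_getLineScore getLineScore getLineScore_alt
  exact (altLoop_eq_loop (index2.length + 1) line1 index1 index2 1 0 []).symm
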